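-- pv_equiv track=rewrite | github.com/ThedBoyZ/OODS_Data-Structure | Recursion/perket.py | perket
-- ===== SOURCE A (Python) =====
-- def calculate(breads, y_sour, y_bitter, index=0):
--     if index == len(breads) - 1:
--         return breads[index][0], breads[index][1]
--     sour, bitter = calculate(breads, y_sour, y_bitter, index + 1)
--     return y_sour * sour * breads[index][0], y_bitter + bitter + breads[index][1]
--
-- def perket(bread_list_combinations, bread_list_index=0, min_difference=1000000001):
--     if bread_list_index == len(bread_list_combinations):
--         return min_difference
--     y_sour, y_bitter = calculate(bread_list_combinations[bread_list_index], 1, 0)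
--     difference = abs(y_sour - y_bitter)
--     using_difference = min_difference
--     if difference <= min_difference:
--         using_difference = difference
--     min_difference = perket(bread_list_combinations, bread_list_index + 1, using_difference)
--     return min_difference
-- ===== SOURCE B (Python) =====
-- def perket(bread_list_combinations, bread_list_index=0, min_difference=1000000001):
--     i = bread_list_index
--     n = len(bread_list_combinations)
--     while i != n:
--         product, total = 1, 0
--         for sour, bitter in bread_list_combinations[i]:
--             product *= sour
--             total += bitter
--         min_difference = min(min_difference, abs(product - total))
--         i += 1
--     return min_difference
-- ===== Notes on version B (the rewrite author's own statement) =====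
-- stated objective: simpler
-- what changed: Replaced both recursions (the outer perket recursion over combinations and the inner calculate recursion computing product/sum) with one iterative while loop that folds each combination's sour-product and bitter-sum in a single inner for loop and keeps a running min.
import Mathlib
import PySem

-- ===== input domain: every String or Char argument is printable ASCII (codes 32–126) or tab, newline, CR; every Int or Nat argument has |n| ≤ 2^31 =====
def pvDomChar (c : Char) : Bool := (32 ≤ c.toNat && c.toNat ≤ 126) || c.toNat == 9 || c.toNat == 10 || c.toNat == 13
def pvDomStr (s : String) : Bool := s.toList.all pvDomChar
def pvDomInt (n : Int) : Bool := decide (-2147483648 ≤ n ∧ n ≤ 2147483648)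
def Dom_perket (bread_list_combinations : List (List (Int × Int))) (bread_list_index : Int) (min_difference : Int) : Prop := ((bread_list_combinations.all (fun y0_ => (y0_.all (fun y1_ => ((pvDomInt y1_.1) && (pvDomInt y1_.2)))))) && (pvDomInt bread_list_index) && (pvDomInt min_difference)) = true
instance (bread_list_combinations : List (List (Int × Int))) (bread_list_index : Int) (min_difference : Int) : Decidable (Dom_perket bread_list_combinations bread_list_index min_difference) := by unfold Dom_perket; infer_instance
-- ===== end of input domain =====

-- B replaces both recursions of A with a single iterative loop (running min, per-combination
-- product/sum folded in an inner loop); equivalence is on the return value.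

-- ===== PORT A =====
-- calculate(breads, y_sour, y_bitter, index): literal port; the recursion is driven by a fuel
-- counter (the Python recursion terminates iff it hits the base index = len-1; fuel = breads.length
-- suffices for every nonempty breads, which Pre_ guarantees). Out-of-fuel / IndexError default
-- values are unreachable inside Pre_.
def calcA (breads : List (Int × Int)) (ySour yBitter index : Int) : Nat → Int × Int
  | 0 => (0, 0)
  | fuel + 1 =>
    if index = (breads.length : Int) - 1 then
      match PySem.List.pyGet? breads index with
      | some p => (p.1, p.2)
      | none => (0, 0)
    else
      let sb := calcA breads ySour yBitter (index + 1) fuel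
      match PySem.List.pyGet? breads index with
      | some p => (ySour * sb.1 * p.1, yBitter + sb.2 + p.2)
      | none => (0, 0)

-- the perket recursion, fuel-driven the same way ((len - index).toNat steps reach the base case
-- index = len whenever A's Python returns)
def perketA (l : List (List (Int × Int))) : Nat → Int → Int → Int
  | 0, _, m => m
  | fuel + 1, i, m =>
    if i = (l.length : Int) then m
    else
      match PySem.List.pyGet? l i with
      | some combo =>
        let yb := calcA combo 1 0 0 combo.length
        let difference := |yb.1 - yb.2|
        let usingDifference := if difference ≤ m then difference else m
        perketA l fuel (i + 1) usingDifference
      | none => m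

def perket (bread_list_combinations : List (List (Int × Int))) (bread_list_index : Int) (min_difference : Int) : Int :=
  perketA bread_list_combinations ((bread_list_combinations.length - bread_list_index).toNat) bread_list_index min_difference

-- ===== PORT B =====
-- the while loop of Source B, fuel-driven by the same count of remaining iterations
def perketAltGo (l : List (List (Int × Int))) : Nat → Int → Int → Int
  | 0, _, m => m
  | fuel + 1, i, m =>
    if i = (l.length : Int) then m
    else
      match PySem.List.pyGet? l i with
      | some combo =>
        let pt := combo.foldl (fun (acc : Int × Int) p => (acc.1 * p.1, acc.2 + p.2)) (1, 0)
        perketAltGo l fuel (i + 1) (min m |pt.1 - pt.2|)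
      | none => m

def perket_alt (bread_list_combinations : List (List (Int × Int))) (bread_list_index : Int) (min_difference : Int) : Int :=
  perketAltGo bread_list_combinations ((bread_list_combinations.length - bread_list_index).toNat) bread_list_index min_difference

-- ===== PRECONDITION & SPEC =====
-- Pre_ excludes exactly the inputs on which the Python A raises: an index outside [-len, len]
-- (IndexError) and an empty combination among those the recursion visits (RecursionError;
-- for a negative start index the wraparound visit covers the whole list, and i.toNat = 0 then).
def Pre_perket (bread_list_combinations : List (List (Int × Int))) (bread_list_index : Int) (min_difference : Int) : Prop :=
  -(bread_list_combinations.length : Int) ≤ bread_list_index ∧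
  bread_list_index ≤ (bread_list_combinations.length : Int) ∧
  ∀ c ∈ bread_list_combinations.drop bread_list_index.toNat, c ≠ []
instance (bread_list_combinations : List (List (Int × Int))) (bread_list_index : Int) (min_difference : Int) : Decidable (Pre_perket bread_list_combinations bread_list_index min_difference) := by unfold Pre_perket; infer_instance
def pvWitness_perket : (List (List (Int × Int))) × Int × Int := ([[(3, 5), (2, 4)], [(1, 7)]], 0, 1000000001)

def Spec_perket (bread_list_combinations : List (List (Int × Int))) (bread_list_index : Int) (min_difference : Int) (out : Int) : Prop := out = perket_alt bread_list_combinations bread_list_index min_difference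
instance (bread_list_combinations : List (List (Int × Int))) (bread_list_index : Int) (min_difference : Int) (out : Int) : Decidable (Spec_perket bread_list_combinations bread_list_index min_difference out) := by unfold Spec_perket; infer_instance

-- ===== CLAIM (what is proved, stated in full; the proofs are below) =====
def Claim_equal_perket : Prop := ∀ (bread_list_combinations : List (List (Int × Int))) (bread_list_index : Int) (min_difference : Int), Dom_perket bread_list_combinations bread_list_index min_difference → Pre_perket bread_list_combinations bread_list_index min_difference → Spec_perket bread_list_combinations bread_list_index min_difference (perket bread_list_combinations bread_list_index min_difference)

-- ===== LEMMAS AND PROOFS =====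

-- B's paired fold computes (init₁ * product of firsts, init₂ + sum of seconds)
theorem foldl_pair_eq (l : List (Int × Int)) (a b : Int) :
    l.foldl (fun (acc : Int × Int) p => (acc.1 * p.1, acc.2 + p.2)) (a, b)
      = (a * (l.map Prod.fst).prod, b + (l.map Prod.snd).sum) := by
  induction l generalizing a b with
  | nil => simp
  | cons x xs ih => simp [ih, mul_assoc, add_assoc]

-- A's calculate, called with y_sour = 1, y_bitter = 0 on a nonempty suffix, returns the
-- product of first components and the sum of second components of that suffix.
theorem calcA_eq (breads : List (Int × Int)) :
    ∀ (fuel : Nat) (i : Nat), i < breads.length → breads.length - i ≤ fuel →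
      calcA breads 1 0 (i : Int) fuel
        = (((breads.drop i).map Prod.fst).prod, ((breads.drop i).map Prod.snd).sum) := by
  intro fuel
  induction fuel with
  | zero => intro i h1 h2; omega
  | succ f ih =>
    intro i h1 h2
    have hget : PySem.List.pyGet? breads (i : Int) = some breads[i] :=
      PySem.List.pyGet?_ofNat breads i h1
    have hdrop : breads.drop i = breads[i] :: breads.drop (i + 1) :=
      List.drop_eq_getElem_cons h1
    by_cases hbase : (i : Int) = (breads.length : Int) - 1
    · have hlast : i = breads.length - 1 := by omega
      have : breads.drop (i + 1) = [] := by
        apply List.drop_eq_nil_of_le; omega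
      simp only [calcA, ← hbase, hget]
      simp [hdrop, this]
    · have hi1 : i + 1 < breads.length := by omega
      have : ((i : Nat) : Int) + 1 = (((i + 1 : Nat)) : Int) := by push_cast; ring
      simp only [calcA, if_neg hbase, this, ih (i + 1) hi1 (by omega), hget]
      have hf : List.drop i (breads.map Prod.fst) = breads[i].1 :: List.drop (i + 1) (breads.map Prod.fst) := by
        rw [← List.map_drop, hdrop, List.map_cons, List.map_drop]
      have hs : List.drop i (breads.map Prod.snd) = breads[i].2 :: List.drop (i + 1) (breads.map Prod.snd) := by
        rw [← List.map_drop, hdrop, List.map_cons, List.map_drop]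
      simp only [List.map_drop] at *
      rw [hf, hs, List.prod_cons, List.sum_cons]
      simp only [Prod.mk.injEq]
      constructor <;> ring

-- The two fuel loops agree whenever every remaining combination is nonempty.
theorem go_eq (l : List (List (Int × Int))) :
    ∀ (fuel : Nat) (i m : Int), (∀ c ∈ l.drop i.toNat, c ≠ []) →
      perketA l fuel i m = perketAltGo l fuel i m := by
  intro fuel
  induction fuel with
  | zero => intro i m _; rfl
  | succ f ih =>
    intro i m hne
    by_cases hstop : i = (l.length : Int)
    · simp [perketA, perketAltGo, hstop]
    · cases hget : PySem.List.pyGet? l i with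
      | none => simp [perketA, perketAltGo, hstop, hget]
      | some combo =>
        have hmem : combo ∈ l.drop i.toNat := by
          by_cases hi : 0 ≤ i
          · have hlt : i < (l.length : Int) := by
              by_contra hge
              have hr : ¬ PySem.Raise.InRange l.length i := by
                simp only [PySem.Raise.InRange]
                omega
              rw [(PySem.List.pyGet?_eq_none_iff l i).2 hr] at hget
              cases hget
            rw [PySem.List.pyGet?_eq_some_getElem l hi hlt] at hget
            cases hget
            rw [List.drop_eq_getElem_cons (by omega)]
            exact List.mem_cons_self
          · have h0 : i.toNat = 0 := by omega
            rw [h0, List.drop_zero]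
            exact PySem.List.mem_of_pyGet?_eq_some l hget
        have hcombo : combo ≠ [] := hne combo hmem
        have hnext : ∀ c ∈ l.drop (i + 1).toNat, c ≠ [] := by
          intro c hc
          apply hne
          have hdd : (l.drop i.toNat).drop ((i + 1).toNat - i.toNat) = l.drop (i + 1).toNat := by
            rw [List.drop_drop]; congr 1; omega
          rw [← hdd] at hc
          exact List.mem_of_mem_drop hc
        have hlen : 0 < combo.length := List.length_pos_iff.2 hcombo
        have hcalc := calcA_eq combo combo.length 0 hlen (by omega)
        have hfold := foldl_pair_eq combo 1 0
        simp only [perketA, perketAltGo, if_neg hstop, hget, Nat.cast_zero] at *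
        rw [hcalc, ih _ _ hnext, hfold]
        congr 1
        simp only [List.drop_zero]
        have : (if |(combo.map Prod.fst).prod - (combo.map Prod.snd).sum| ≤ m
            then |(combo.map Prod.fst).prod - (combo.map Prod.snd).sum| else m)
            = min m |1 * (combo.map Prod.fst).prod - (0 + (combo.map Prod.snd).sum)| := by
          rw [one_mul, zero_add]
          rcases le_or_gt |(combo.map Prod.fst).prod - (combo.map Prod.snd).sum| m with h | h
          · rw [if_pos h, min_eq_right h]
          · rw [if_neg (by omega), min_eq_left (by omega)]
        exact this

theorem perket_spec : Claim_equal_perket := by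
  intro l i m _ hpre
  unfold Spec_perket perket perket_alt
  exact go_eq l _ i m hpre.2.2
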